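-- pv_equiv track=rewrite | github.com/ivanovnikita/graphics_engine | code_generators/generate_vulkan_reflection.py | transform_name_part
-- ===== SOURCE A (Python) =====
-- def transform_name_part(name_part):
--     if name_part.lower() == 'bit':
--         return ''
--
--     if name_part.lower() in [
--         'ext',
--         'khr',
--         'qcom',
--     ]:
--         return name_part.upper()
--
--     result = ''
--     is_first = True
--     for char in name_part:
--         if is_first:
--             result += str(char).upper()
--
--             if not str(char).isdigit():
--                 is_first = False
--         else:
--             result += str(char).lower()
--
--     return result
-- ===== SOURCE B (Python) =====
-- def transform_name_part(name_part):
--     low = name_part.lower()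
--     if low == 'bit':
--         return ''
--     if low in ('ext', 'khr', 'qcom'):
--         return name_part.upper()
--     i = next((j for j, c in enumerate(name_part) if not c.isdigit()), len(name_part))
--     return name_part[:i + 1].upper() + name_part[i + 1:].lower()
-- ===== Notes on version B (the rewrite author's own statement) =====
-- stated objective: simpler
-- what changed: Replaced the per-character accumulator state machine (is_first flag flipped inside the loop) by computing the index of the first non-digit character and applying two bulk slice/case operations (prefix.upper() + suffix.lower()).
import Mathlib
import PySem

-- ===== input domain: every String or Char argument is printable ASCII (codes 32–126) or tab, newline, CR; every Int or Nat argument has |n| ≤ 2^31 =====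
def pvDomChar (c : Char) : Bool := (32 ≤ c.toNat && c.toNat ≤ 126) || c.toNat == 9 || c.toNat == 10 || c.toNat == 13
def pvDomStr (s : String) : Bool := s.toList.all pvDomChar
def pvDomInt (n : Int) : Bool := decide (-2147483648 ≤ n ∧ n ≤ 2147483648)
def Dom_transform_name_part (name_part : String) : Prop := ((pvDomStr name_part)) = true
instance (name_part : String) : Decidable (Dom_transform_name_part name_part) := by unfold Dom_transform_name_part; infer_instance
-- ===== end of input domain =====

-- B replaces A's per-character is_first state machine by an index computation
-- (first non-digit position) followed by two bulk slice/case operations: simpler.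

-- ===== PORT A =====
-- one loop step of A: result accumulator and the is_first flag
def tnpStepA (st : List Char × Bool) (c : Char) : List Char × Bool :=
  if st.2 then
    (st.1 ++ [PySem.Chars.upperChar c],
     if !(PySem.Chars.isdigit c) then false else st.2)
  else
    (st.1 ++ [PySem.Chars.lowerChar c], st.2)

def transform_name_part (name_part : String) : String :=
  if PySem.Str.lower name_part == "bit" then ""
  else if ["ext", "khr", "qcom"].contains (PySem.Str.lower name_part) then
    PySem.Str.upper name_part
  else
    String.ofList (name_part.toList.foldl tnpStepA ([], true)).1

-- ===== PORT B =====
-- index of the first non-digit character (len(cs) if none): B's `next(...)` expression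
def tnpFirstNonDigit (cs : List Char) : Nat :=
  (cs.findIdx? (fun c => !PySem.Chars.isdigit c)).getD cs.length

def transform_name_part_alt (name_part : String) : String :=
  if PySem.Str.lower name_part == "bit" then ""
  else if ["ext", "khr", "qcom"].contains (PySem.Str.lower name_part) then
    PySem.Str.upper name_part
  else
    String.ofList
      (PySem.Chars.upper (name_part.toList.take (tnpFirstNonDigit name_part.toList + 1)) ++
       PySem.Chars.lower (name_part.toList.drop (tnpFirstNonDigit name_part.toList + 1)))

-- ===== PRECONDITION & SPEC =====
def Spec_transform_name_part (name_part : String) (out : String) : Prop := out = transform_name_part_alt name_part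
instance (name_part : String) (out : String) : Decidable (Spec_transform_name_part name_part out) := by unfold Spec_transform_name_part; infer_instance

-- ===== CLAIM (what is proved, stated in full; the proofs are below) =====
def Claim_equal_transform_name_part : Prop := ∀ (name_part : String), Dom_transform_name_part name_part → Spec_transform_name_part name_part (transform_name_part name_part)

-- ===== LEMMAS AND PROOFS =====
theorem tnpFoldFalse (cs : List Char) (acc : List Char) :
    cs.foldl tnpStepA (acc, false) = (acc ++ PySem.Chars.lower cs, false) := by
  induction cs generalizing acc with
  | nil => simp [PySem.Chars.lower]
  | cons c cs ih => simp [tnpStepA, ih, PySem.Chars.lower]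

theorem tnpFoldTrue (cs : List Char) (acc : List Char) :
    (cs.foldl tnpStepA (acc, true)).1 =
      acc ++ (PySem.Chars.upper (cs.take (tnpFirstNonDigit cs + 1)) ++
        PySem.Chars.lower (cs.drop (tnpFirstNonDigit cs + 1))) := by
  induction cs generalizing acc with
  | nil => simp [tnpFirstNonDigit, PySem.Chars.upper, PySem.Chars.lower]
  | cons c cs ih =>
    by_cases h : PySem.Chars.isdigit c = true
    · have hstep : tnpStepA (acc, true) c = (acc ++ [PySem.Chars.upperChar c], true) := by
        simp [tnpStepA, h]
      have hfind : (c :: cs).findIdx? (fun c => !PySem.Chars.isdigit c)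
          = (cs.findIdx? (fun c => !PySem.Chars.isdigit c)).map (· + 1) := by
        simp [List.findIdx?_cons, h]
      rw [List.foldl_cons, hstep, ih]
      unfold tnpFirstNonDigit
      rw [hfind]
      cases hj : cs.findIdx? (fun c => !PySem.Chars.isdigit c) with
      | none => simp [PySem.Chars.upper, PySem.Chars.lower]
      | some j =>
        simp only [Option.map_some, Option.getD_some]
        have ht : (c :: cs).take (j + 1 + 1) = c :: cs.take (j + 1) := rfl
        have hd : (c :: cs).drop (j + 1 + 1) = cs.drop (j + 1) := rfl
        rw [ht, hd]
        simp [PySem.Chars.upper]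
    · have hstep : tnpStepA (acc, true) c = (acc ++ [PySem.Chars.upperChar c], false) := by
        simp [tnpStepA, h]
      have hfind : (c :: cs).findIdx? (fun c => !PySem.Chars.isdigit c) = some 0 := by
        simp [List.findIdx?_cons, h]
      rw [List.foldl_cons, hstep, tnpFoldFalse]
      unfold tnpFirstNonDigit
      rw [hfind]
      simp [PySem.Chars.upper, PySem.Chars.lower]

-- ===== VERDICT (by name: the statement is the Claim_ definition above) =====
theorem transform_name_part_spec : Claim_equal_transform_name_part := by
  intro s _
  unfold Spec_transform_name_part transform_name_part transform_name_part_alt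
  split_ifs with h1 h2
  · rfl
  · rfl
  · rw [tnpFoldTrue]
    simp
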